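-- pv_equiv track=rewrite | github.com/ant0nras/ant0nras.github.io | calculate.py | joinCombos
-- ===== SOURCE A (Python) =====
-- def combinations(set, length, norep, prev = []):
--     combos = []
--     if len(prev) == length:
--         return [prev]
--     for index, rank in enumerate(set):
--         cprev = prev.copy()
--         cprev.append(rank)
--         combos += combinations(set[index + norep:], length, norep, cprev)
--     return combos
--
-- def joinCombos(ranks, rlist):
--     norep = False
--     combos = []
--     if len(rlist) == 1:
--         return combinations(ranks, rlist[0], norep)
--     for combo1 in joinCombos(ranks, rlist[0: len(rlist) - 1]):
--         for combo2 in combinations(ranks, rlist[len(rlist) - 1], norep):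
--             combos.append(combo1 + combo2)
--     return combos
-- ===== SOURCE B (Python) =====
-- def joinCombos(ranks, rlist):
--     # Bottom-up DP: table[n][j] = all length-n combos (with replacement, in A's
--     # lexicographic order) drawn from ranks[j:]; each level is computed once and
--     # shared, then the per-length parts are joined by a running product.
--     m = len(ranks)
--     prev = [[[]]] * (m + 1)
--     table = [prev]
--     for _ in range(max(rlist)):
--         row = [[]]
--         for j in range(m - 1, -1, -1):
--             row = [[[ranks[j]] + c for c in prev[j]] + row[0]] + row
--         table.append(row)
--         prev = row
--     res = [[]]
--     for l in rlist:
--         res = [r + c for r in res for c in table[l][0]]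
--     return res
-- ===== Notes on version B (the rewrite author's own statement) =====
-- stated objective: alternative
-- what changed: A enumerates combinations by per-call DFS recursion on list slices and recomputes the last length's combination list once per prefix combo inside its recursion over rlist; B instead builds a bottom-up dynamic-programming table (row n, cell j = length-n combos drawn from ranks[j:]) once, sharing suffix cells across lengths, and joins the per-length parts with a single running-product fold.
-- outside the precondition, e.g. on joinCombos([], [-3, 1, -1, 1]): A returns [], B raises IndexError
import Mathlib
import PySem

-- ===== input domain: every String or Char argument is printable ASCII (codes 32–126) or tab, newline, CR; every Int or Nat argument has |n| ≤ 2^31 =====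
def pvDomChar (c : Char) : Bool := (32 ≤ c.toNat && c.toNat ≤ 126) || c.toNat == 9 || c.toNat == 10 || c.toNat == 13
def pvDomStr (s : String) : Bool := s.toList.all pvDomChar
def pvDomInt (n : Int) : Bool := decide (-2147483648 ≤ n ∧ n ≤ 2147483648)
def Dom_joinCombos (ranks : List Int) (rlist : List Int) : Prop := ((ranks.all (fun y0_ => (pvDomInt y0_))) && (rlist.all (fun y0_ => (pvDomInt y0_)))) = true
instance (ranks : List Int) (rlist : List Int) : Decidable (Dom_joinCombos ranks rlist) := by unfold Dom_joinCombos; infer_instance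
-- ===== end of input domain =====

-- B replaces A's recursive re-enumeration (which recomputes the last-length combination
-- list once per prefix combo) with a bottom-up table of suffix combination lists built
-- once and shared across all lengths in rlist (objective: alternative; same output).

-- ===== PORT A =====
-- combinations(set, length, norep, prev): `fuel` is only a totality guard — Python
-- diverges exactly when it would run out; callers pass length.toNat, which is never
-- exhausted for the nonnegative lengths Pre_ admits.
def combinationsA (set : List Int) (length : Int) (norep : Bool) (prev : List Int) (fuel : Nat) : List (List Int) :=
  if (prev.length : Int) = length then [prev]
  else
    match fuel with
    | 0 => []
    | f + 1 =>
      (PySem.List.enumerate set 0).foldl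
        (fun combos ir =>
          combos ++ combinationsA (PySem.List.slice set (some (ir.1 + (if norep then 1 else 0))) none) length norep (prev ++ [ir.2]) f)
        []

def joinCombos (ranks : List Int) (rlist : List Int) : List (List Int) :=
  if rlist.length = 1 then
    combinationsA ranks (PySem.List.pyGetD rlist 0 0) false [] (PySem.List.pyGetD rlist 0 0).toNat
  else if rlist.length = 0 then []
  else
    (joinCombos ranks (PySem.List.slice rlist (some 0) (some ((rlist.length : Int) - 1)))).foldl
      (fun combos c1 =>
        (combinationsA ranks (PySem.List.pyGetD rlist ((rlist.length : Int) - 1) 0) false []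
            (PySem.List.pyGetD rlist ((rlist.length : Int) - 1) 0).toNat).foldl
          (fun combos c2 => combos ++ [c1 ++ c2]) combos)
      []
termination_by rlist.length
decreasing_by
  simp only [PySem.List.slice_zero_start]
  rw [PySem.List.slice_to rlist (by omega : (0:Int) ≤ (rlist.length : Int) - 1)]
  simp only [List.length_take]
  omega

-- ===== PORT B =====
-- the `for j in range(m-1, -1, -1): row = [...] + row` inner loop of Source B
def rowStepB (ranks : List Int) (prev : List (List (List Int))) : List (List (List Int)) :=
  (PySem.List.pyRange ((ranks.length : Int) - 1) (-1) (-1)).foldl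
    (fun row j =>
      ((PySem.List.pyGetD prev j []).map (fun c => PySem.List.pyGetD ranks j 0 :: c)
        ++ PySem.List.pyGetD row 0 []) :: row)
    [[]]

-- dfsA over a dropped suffix: the DP cell recurrence

def joinCombos_alt (ranks : List Int) (rlist : List Int) : List (List Int) :=
  let init : List (List (List Int)) := List.replicate (ranks.length + 1) [[]]
  let tp := (PySem.List.pyRange 0 ((PySem.List.max? rlist (fun y => y)).getD 0) 1).foldl
      (fun tp _ => ((tp.1 ++ [rowStepB ranks tp.2]), rowStepB ranks tp.2))
      ([init], init)
  rlist.foldl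
    (fun res l =>
      res.flatMap (fun r => (PySem.List.pyGetD (PySem.List.pyGetD tp.1 l []) 0 []).map (fun c => r ++ c)))
    [[]]

-- ===== PRECONDITION & SPEC =====
-- Pre_ excludes empty rlist and negative requested lengths: there A's recursions diverge
-- (RecursionError), except in the degenerate case ranks = [] where A still returns [] while
-- B's natural table lookup raises; both programs raise on an empty rlist.
def Pre_joinCombos (ranks : List Int) (rlist : List Int) : Prop :=
  rlist ≠ [] ∧ ∀ l ∈ rlist, 0 ≤ l
instance (ranks : List Int) (rlist : List Int) : Decidable (Pre_joinCombos ranks rlist) := by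
  unfold Pre_joinCombos; infer_instance

def pvWitness_joinCombos : List Int × List Int := ([1, 2], [2, 1])

def Spec_joinCombos (ranks : List Int) (rlist : List Int) (out : List (List Int)) : Prop := out = joinCombos_alt ranks rlist
instance (ranks : List Int) (rlist : List Int) (out : List (List Int)) : Decidable (Spec_joinCombos ranks rlist out) := by unfold Spec_joinCombos; infer_instance

-- ===== CLAIM (what is proved, stated in full; the proofs are below) =====
def Claim_equal_joinCombos : Prop := ∀ (ranks : List Int) (rlist : List Int), Dom_joinCombos ranks rlist → Pre_joinCombos ranks rlist → Spec_joinCombos ranks rlist (joinCombos ranks rlist)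

-- ===== LEMMAS AND PROOFS =====

-- the common specification: all length-n combinations-with-replacement of `set`,
-- in A's lexicographic DFS order
def dfsA : Nat → List Int → List (List Int)
  | 0, _ => [[]]
  | n + 1, set =>
      (List.range set.length).flatMap
        (fun k => (dfsA n (set.drop k)).map (fun c => set.getD k 0 :: c))

theorem combA_eq_dfs (n : Nat) (set : List Int) (prev : List Int) (fuel : Nat)
    (h : n ≤ fuel) :
    combinationsA set ((prev.length : Int) + n) false prev fuel
      = (dfsA n set).map (prev ++ ·) := by
  induction n generalizing set prev fuel with
  | zero => cases fuel <;> simp [combinationsA, dfsA]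
  | succ n ih =>
    cases fuel with
    | zero => omega
    | succ f =>
      rw [combinationsA]
      rw [if_neg (by push_cast; omega)]
      rw [PySem.List.foldl_append_eq_flatMap, List.nil_append]
      rw [PySem.List.enumerate_eq_map_pyRange set 0]
      show (List.map _ (PySem.List.pyRange 0 (set.length : Int) 1)).flatMap _ = _
      rw [PySem.List.pyRange_zero_natCast, List.map_map, List.flatMap_map]
      rw [dfsA, List.map_flatMap]
      congr 1
      funext k
      show combinationsA (PySem.List.slice set (some ((k:Int) + if false then 1 else 0)) none) _ false (prev ++ [PySem.List.pyGetD set (k:Int) 0]) f = _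
      simp only [Bool.false_eq_true, if_false, Int.add_zero,
        PySem.List.slice_from_natCast, PySem.List.pyGetD_natCast]
      have hlen : (prev.length : Int) + ((n:Nat) + 1 : Nat) = (((prev ++ [set.getD k 0]).length : Int)) + n := by
        simp only [List.length_append, List.length_cons, List.length_nil]; push_cast; ring
      rw [hlen, ih (set.drop k) (prev ++ [set.getD k 0]) f (by omega)]
      simp [List.map_map, Function.comp, List.append_assoc]

theorem combA_top (ranks : List Int) (l : Int) (h0 : 0 ≤ l) :
    combinationsA ranks l false [] l.toNat = dfsA l.toNat ranks := by
  have := combA_eq_dfs l.toNat ranks [] l.toNat (le_refl _)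
  simp only [List.length_nil, Int.natCast_zero, Int.zero_add,
    Int.toNat_of_nonneg h0] at this
  rw [this]
  simp

theorem dfsA_cons (n : Nat) (x : Int) (t : List Int) :
    dfsA (n + 1) (x :: t) = (dfsA n (x :: t)).map (x :: ·) ++ dfsA (n + 1) t := by
  conv_lhs => rw [dfsA]
  rw [List.length_cons, List.range_succ_eq_map, List.flatMap_cons, List.flatMap_map]
  congr 1

-- the DP cell recurrence over a dropped suffix
theorem dfsA_drop (ranks : List Int) (n : Nat) (j : Nat) (hj : j < ranks.length) :
    dfsA (n + 1) (ranks.drop j)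
      = (dfsA n (ranks.drop j)).map (ranks.getD j 0 :: ·) ++ dfsA (n + 1) (ranks.drop (j + 1)) := by
  have hd : ranks.drop j = ranks.getD j 0 :: ranks.drop (j + 1) := by
    rw [List.getD_eq_getElem ranks 0 hj]
    exact (List.getElem_cons_drop hj).symm
  rw [hd, dfsA_cons, ← hd]

theorem rowStepB_spec (ranks : List Int) (i : Nat) :
    rowStepB ranks ((List.range (ranks.length + 1)).map (fun j => dfsA i (ranks.drop j)))
      = (List.range (ranks.length + 1)).map (fun j => dfsA (i + 1) (ranks.drop j)) := by
  unfold rowStepB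
  have hm : (((ranks.length : Int) - 1) - (-1)).toNat = ranks.length := by omega
  rw [PySem.List.pyRange_neg_one, hm, List.foldl_map]
  rw [PySem.List.foldl_congr_mem (List.range ranks.length) _
      (fun x y =>
        ((dfsA i (ranks.drop (ranks.length - 1 - y))).map
            (fun c => ranks.getD (ranks.length - 1 - y) 0 :: c)
          ++ PySem.List.pyGetD x 0 []) :: x)
      [[]]
      (by
        intro acc y hy
        rw [List.mem_range] at hy
        have hc : ((ranks.length : Int) - 1 - (y : Int)) = ((ranks.length - 1 - y : Nat) : Int) := by
          omega
        rw [hc, PySem.List.pyGetD_natCast, PySem.List.pyGetD_natCast,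
          PySem.List.getD_map_range _ _ _ _ (by omega : ranks.length - 1 - y < ranks.length + 1)])]
  have key : ∀ (t : Nat), t ≤ ranks.length →
      (List.range t).foldl
        (fun x y =>
          ((dfsA i (ranks.drop (ranks.length - 1 - y))).map
              (fun c => ranks.getD (ranks.length - 1 - y) 0 :: c)
            ++ PySem.List.pyGetD x 0 []) :: x)
        [[]]
      = (List.range' (ranks.length - t) (t + 1)).map (fun j => dfsA (i + 1) (ranks.drop j)) := by
    intro t ht
    induction t with
    | zero => simp [dfsA]
    | succ t iht =>
      rw [List.range_succ, List.foldl_append, iht (by omega), List.foldl_cons, List.foldl_nil]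
      have hr1 : List.range' (ranks.length - t) (t + 1)
          = (ranks.length - t) :: List.range' (ranks.length - t + 1) t := List.range'_succ
      have hr2 : List.range' (ranks.length - (t + 1)) (t + 1 + 1)
          = (ranks.length - (t + 1)) :: List.range' (ranks.length - (t + 1) + 1) (t + 1) := List.range'_succ
      have hhead : PySem.List.pyGetD
          ((List.range' (ranks.length - t) (t + 1)).map (fun j => dfsA (i + 1) (ranks.drop j))) 0 []
          = dfsA (i + 1) (ranks.drop (ranks.length - t)) := by
        rw [hr1]; simp [PySem.List.pyGetD_zero]
      rw [hhead, hr2, List.map_cons]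
      have e1 : ranks.length - (t + 1) + 1 = ranks.length - t := by omega
      have e2 : ranks.length - (t + 1) = ranks.length - 1 - t := by omega
      rw [e1, e2]
      congr 1
      have e3 : ranks.length - t = (ranks.length - 1 - t) + 1 := by omega
      rw [e3, ← dfsA_drop ranks i _ (by omega : ranks.length - 1 - t < ranks.length)]
  rw [key ranks.length (le_refl _)]
  simp [List.range_eq_range']

def rowI (ranks : List Int) : Nat → List (List (List Int))
  | 0 => List.replicate (ranks.length + 1) [[]]
  | i + 1 => rowStepB ranks (rowI ranks i)

theorem rowI_eq (ranks : List Int) (i : Nat) :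
    rowI ranks i = (List.range (ranks.length + 1)).map (fun j => dfsA i (ranks.drop j)) := by
  induction i with
  | zero =>
    show List.replicate (ranks.length + 1) [[]] = _
    rw [show (fun j => dfsA 0 (ranks.drop j)) = (fun (_ : Nat) => ([[]] : List (List Int))) from rfl,
      List.map_const', List.length_range]
  | succ i ih => rw [rowI, ih, rowStepB_spec]

theorem table_fold (ranks : List Int) (n : Nat) :
    (List.range n).foldl
        (fun (tp : List (List (List (List Int))) × List (List (List Int))) _ =>
          ((tp.1 ++ [rowStepB ranks tp.2]), rowStepB ranks tp.2))
        ([List.replicate (ranks.length + 1) [[]]], List.replicate (ranks.length + 1) [[]])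
      = ((List.range (n + 1)).map (rowI ranks), rowI ranks n) := by
  induction n with
  | zero => simp [rowI]
  | succ n ih =>
    rw [List.range_succ, List.foldl_append, ih, List.foldl_cons, List.foldl_nil]
    rw [List.range_succ (n := n + 1), List.map_append]
    rfl

theorem alt_eq_foldl (ranks : List Int) (rlist : List Int)
    (hne : rlist ≠ []) (hpos : ∀ l ∈ rlist, 0 ≤ l) :
    joinCombos_alt ranks rlist
      = rlist.foldl
          (fun res l => res.flatMap (fun r => (dfsA l.toNat ranks).map (fun c => r ++ c))) [[]] := by
  obtain ⟨K, hK⟩ : ∃ K, PySem.List.max? rlist (fun y => y) = some K := by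
    cases h : PySem.List.max? rlist (fun y => y) with
    | none => exact absurd ((PySem.List.max?_eq_none_iff rlist (fun y => y)).mp h) hne
    | some K => exact ⟨K, rfl⟩
  have hK0 : 0 ≤ K := hpos K (PySem.List.max?_mem hK)
  have hKmax : ∀ l ∈ rlist, l ≤ K := fun l hl => PySem.List.max?_isMax hK l hl
  unfold joinCombos_alt
  rw [hK]
  simp only [Option.getD_some]
  rw [show K = ((K.toNat : Nat) : Int) from (Int.toNat_of_nonneg hK0).symm,
    PySem.List.pyRange_zero_natCast, List.foldl_map, table_fold]
  apply PySem.List.foldl_congr_mem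
  intro acc l hl
  have h0l : 0 ≤ l := hpos l hl
  have hlK : l.toNat < K.toNat + 1 := by
    have := hKmax l hl; omega
  rw [show l = ((l.toNat : Nat) : Int) from (Int.toNat_of_nonneg h0l).symm,
    PySem.List.pyGetD_natCast, PySem.List.getD_map_range _ _ _ _ hlK,
    rowI_eq, PySem.List.pyGetD_zero,
    PySem.List.getD_map_range _ _ _ _ (by omega : 0 < ranks.length + 1), List.drop_zero]
  rw [Int.toNat_natCast]

theorem jc_eq_foldl (ranks : List Int) (rlist : List Int)
    (hne : rlist ≠ []) (hpos : ∀ l ∈ rlist, 0 ≤ l) :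
    joinCombos ranks rlist
      = rlist.foldl
          (fun res l => res.flatMap (fun r => (dfsA l.toNat ranks).map (fun c => r ++ c))) [[]] := by
  induction rlist using List.reverseRecOn with
  | nil => exact absurd rfl hne
  | append_singleton l x ih =>
    have h0x : 0 ≤ x := hpos x (by simp)
    cases l with
    | nil =>
      rw [joinCombos, if_pos (by simp)]
      simp only [List.nil_append, PySem.List.pyGetD_zero_cons]
      rw [combA_top ranks x h0x, List.foldl_cons, List.foldl_nil]
      simp [List.flatMap_cons]
    | cons a t =>
      rw [joinCombos]
      rw [if_neg (by simp), if_neg (by simp)]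
      have hslice : PySem.List.slice ((a :: t) ++ [x]) (some 0) (some ((((a :: t) ++ [x]).length : Int) - 1)) = a :: t := by
        simp only [PySem.List.slice_zero_start]
        rw [PySem.List.slice_to _ (by simp; omega)]
        simp
      have hlast : PySem.List.pyGetD ((a :: t) ++ [x]) ((((a :: t) ++ [x]).length : Int) - 1) 0 = x := by
        have hc : ((((a :: t) ++ [x]).length : Int) - 1) = (((a :: t).length : Nat) : Int) := by
          simp
        rw [hc, PySem.List.pyGetD_natCast]
        simp
      rw [hslice, hlast, combA_top ranks x h0x]
      rw [ih (by simp) (fun l hl => hpos l (by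
        simp only [List.cons_append, List.mem_cons, List.mem_append] at hl ⊢
        tauto))]
      rw [PySem.List.foldl_congr_mem
        (List.foldl (fun res l => List.flatMap (fun r => List.map (fun c => r ++ c) (dfsA l.toNat ranks)) res) [[]] (a :: t))
        (fun combos c1 => List.foldl (fun combos c2 => combos ++ [c1 ++ c2]) combos (dfsA x.toNat ranks))
        (fun combos c1 => combos ++ (dfsA x.toNat ranks).map (fun c => c1 ++ c)) []
        (fun acc c1 _ => PySem.List.foldl_append_singleton_eq_map _ _ _)]
      rw [PySem.List.foldl_append_eq_flatMap, List.nil_append]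
      conv_rhs => rw [show (a :: t) ++ [x] = a :: (t ++ [x]) from rfl, List.foldl_cons,
        List.foldl_append, List.foldl_cons, List.foldl_nil]
      rw [List.foldl_cons]

-- ===== VERDICT (by name: the statement is the Claim_ definition above) =====
theorem joinCombos_spec : Claim_equal_joinCombos := by
  intro ranks rlist _ hpre
  unfold Spec_joinCombos
  rw [jc_eq_foldl ranks rlist hpre.1 hpre.2, alt_eq_foldl ranks rlist hpre.1 hpre.2]
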